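-- pv_equiv track=rewrite | github.com/limit5/OmniSight-Productizer | backend/security/bot_challenge.py | _classify_error_kind
-- ===== SOURCE A (Python) =====
-- def _classify_error_kind(error_codes: tuple[str, ...]) -> str:
--     """Map vendor-specific error codes onto a coarse ``error_kind``
--     label (per AS.0.5 §3 metadata schema): ``timeout`` / ``5xx`` /
--     ``4xx_invalid_token`` / ``dns_fail`` / ``unknown``."""
--     if not error_codes:
--         return "unknown"
--     codes = [c.lower() for c in error_codes]
--     if any("timeout" in c or "duplicate" in c for c in codes):
--         return "timeout"
--     if any(c.startswith("http-5") for c in codes):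
--         return "5xx"
--     if any(c.startswith("http-4") for c in codes):
--         return "4xx_invalid_token"
--     if any("invalid" in c for c in codes):
--         return "4xx_invalid_token"
--     if any("missing" in c for c in codes):
--         return "4xx_invalid_token"
--     return "unknown"
-- ===== SOURCE B (Python) =====
-- def _classify_error_kind(error_codes: tuple[str, ...]) -> str:
--     """Single collection pass recording category flags, then a priority cascade."""
--     if not error_codes:
--         return "unknown"
--     saw_timeout = saw_5xx = saw_token = False
--     for raw in error_codes:
--         c = raw.lower()
--         if "timeout" in c or "duplicate" in c:
--             saw_timeout = True
--         elif c.startswith("http-5"):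
--             saw_5xx = True
--         elif c.startswith("http-4") or "invalid" in c or "missing" in c:
--             saw_token = True
--     if saw_timeout:
--         return "timeout"
--     if saw_5xx:
--         return "5xx"
--     if saw_token:
--         return "4xx_invalid_token"
--     return "unknown"
-- ===== Notes on version B (the rewrite author's own statement) =====
-- stated objective: alternative
-- what changed: Replaces five separate any()-scans (plus a list of lowered copies) with one pass that lowers each code once and records three category flags, followed by a priority cascade.
import Mathlib
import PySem

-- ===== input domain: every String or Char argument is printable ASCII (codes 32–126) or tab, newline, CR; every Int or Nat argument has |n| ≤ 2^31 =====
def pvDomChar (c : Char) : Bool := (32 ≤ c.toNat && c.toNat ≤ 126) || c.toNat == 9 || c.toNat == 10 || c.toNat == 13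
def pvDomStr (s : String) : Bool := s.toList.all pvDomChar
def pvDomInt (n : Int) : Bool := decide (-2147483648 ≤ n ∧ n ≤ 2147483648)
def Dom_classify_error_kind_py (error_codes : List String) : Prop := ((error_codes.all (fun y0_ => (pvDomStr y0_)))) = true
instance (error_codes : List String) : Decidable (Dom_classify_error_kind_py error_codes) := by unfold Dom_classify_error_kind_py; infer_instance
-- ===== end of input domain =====

-- B replaces A's five separate any()-scans with one pass that lowers each code once and sets three category flags, then a priority cascade (alternative decomposition, same cost).
-- ===== PORT A =====
def pvPT (c : String) : Bool := PySem.Str.isIn "timeout" c || PySem.Str.isIn "duplicate" c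
def pvP5 (c : String) : Bool := PySem.Str.startswith c "http-5"
def pvP4 (c : String) : Bool := PySem.Str.startswith c "http-4"
def pvPI (c : String) : Bool := PySem.Str.isIn "invalid" c
def pvPM (c : String) : Bool := PySem.Str.isIn "missing" c

def classify_error_kind_py (error_codes : List String) : String :=
  if error_codes = [] then "unknown"
  else
    let codes := error_codes.map PySem.Str.lower
    if codes.any pvPT then "timeout"
    else if codes.any pvP5 then "5xx"
    else if codes.any pvP4 then "4xx_invalid_token"
    else if codes.any pvPI then "4xx_invalid_token"
    else if codes.any pvPM then "4xx_invalid_token"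
    else "unknown"

-- ===== PORT B =====
-- one pass: lower each code once, set three category flags; then a priority cascade
def pvStep (st : Bool × Bool × Bool) (raw : String) : Bool × Bool × Bool :=
  let c := PySem.Str.lower raw
  if pvPT c then (true, st.2.1, st.2.2)
  else if pvP5 c then (st.1, true, st.2.2)
  else if pvP4 c || pvPI c || pvPM c then (st.1, st.2.1, true)
  else st

def classify_error_kind_py_alt (error_codes : List String) : String :=
  if error_codes = [] then "unknown"
  else
    let st := error_codes.foldl pvStep (false, false, false)
    if st.1 then "timeout"
    else if st.2.1 then "5xx"
    else if st.2.2 then "4xx_invalid_token"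
    else "unknown"

-- ===== PRECONDITION & SPEC =====
def Spec_classify_error_kind_py (error_codes : List String) (out : String) : Prop := out = classify_error_kind_py_alt error_codes
instance (error_codes : List String) (out : String) : Decidable (Spec_classify_error_kind_py error_codes out) := by unfold Spec_classify_error_kind_py; infer_instance

-- ===== CLAIM (what is proved, stated in full; the proofs are below) =====
def Claim_equal_classify_error_kind_py : Prop := ∀ (error_codes : List String), Dom_classify_error_kind_py error_codes → Spec_classify_error_kind_py error_codes (classify_error_kind_py error_codes)

-- ===== LEMMAS AND PROOFS =====

-- ===== VERDICT (by name: the statement is the Claim_ definition above) =====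
-- the fold's three flags, characterised as any-scans over the lowered codes
theorem pvStep_foldl (xs : List String) (st : Bool × Bool × Bool) :
    xs.foldl pvStep st =
      (st.1 || (xs.map PySem.Str.lower).any pvPT,
       st.2.1 || (xs.map PySem.Str.lower).any (fun c => !pvPT c && pvP5 c),
       st.2.2 || (xs.map PySem.Str.lower).any
         (fun c => !pvPT c && !pvP5 c && (pvP4 c || pvPI c || pvPM c))) := by
  induction xs generalizing st with
  | nil => simp
  | cons x xs ih =>
    simp only [List.foldl_cons, List.map_cons, List.any_cons, ih]
    unfold pvStep
    by_cases h1 : pvPT (PySem.Str.lower x) <;>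
      by_cases h2 : pvP5 (PySem.Str.lower x) <;>
      by_cases h3 : pvP4 (PySem.Str.lower x) || pvPI (PySem.Str.lower x) || pvPM (PySem.Str.lower x) <;>
      simp [h1, h2, h3]

theorem classify_error_kind_py_spec : Claim_equal_classify_error_kind_py := by
  intro error_codes _
  unfold Spec_classify_error_kind_py classify_error_kind_py classify_error_kind_py_alt
  by_cases hnil : error_codes = []
  · simp [hnil]
  · simp only [hnil, if_false, pvStep_foldl, Bool.false_or]
    by_cases hT : (error_codes.map PySem.Str.lower).any pvPT
    · simp [hT]
    · have hT' : ∀ c ∈ error_codes.map PySem.Str.lower, ¬ pvPT c = true := by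
        simpa [List.any_eq_true] using hT
      by_cases h5 : (error_codes.map PySem.Str.lower).any pvP5
      · have : (error_codes.map PySem.Str.lower).any (fun c => !pvPT c && pvP5 c) = true := by
          rcases List.any_eq_true.mp h5 with ⟨c, hc, hp⟩
          exact List.any_eq_true.mpr ⟨c, hc, by simp [hT' c hc, hp]⟩
        have hTf : (error_codes.map PySem.Str.lower).any pvPT = false := by
          simpa using hT
        simp only [hTf, this, h5, Bool.false_eq_true, if_false, if_true]
      · have h5' : ∀ c ∈ error_codes.map PySem.Str.lower, ¬ pvP5 c = true := by
          simpa [List.any_eq_true] using h5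
        have e5 : (error_codes.map PySem.Str.lower).any (fun c => !pvPT c && pvP5 c) = false := by
          simp only [List.any_eq_false]
          intro c hc
          simp [h5' c hc]
        have e4 : (error_codes.map PySem.Str.lower).any
            (fun c => !pvPT c && !pvP5 c && (pvP4 c || pvPI c || pvPM c)) =
            ((error_codes.map PySem.Str.lower).any pvP4 ||
             (error_codes.map PySem.Str.lower).any pvPI ||
             (error_codes.map PySem.Str.lower).any pvPM) := by
          by_cases h4 : ((error_codes.map PySem.Str.lower).any pvP4 ||
             (error_codes.map PySem.Str.lower).any pvPI ||
             (error_codes.map PySem.Str.lower).any pvPM) = true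
          · rw [h4]
            rcases Bool.or_eq_true_iff.mp h4 with h | h
            · rcases Bool.or_eq_true_iff.mp h with h | h <;>
              · rcases List.any_eq_true.mp h with ⟨c, hc, hp⟩
                exact List.any_eq_true.mpr ⟨c, hc, by simp [hT' c hc, h5' c hc, hp]⟩
            · rcases List.any_eq_true.mp h with ⟨c, hc, hp⟩
              exact List.any_eq_true.mpr ⟨c, hc, by simp [hT' c hc, h5' c hc, hp]⟩
          · simp only [Bool.not_eq_true] at h4
            rw [h4]
            simp only [List.any_eq_false] at h4 ⊢
            intro c hc
            simp only [Bool.or_eq_false_iff, List.any_eq_false] at h4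
            simp [h4.1.1 c hc, h4.1.2 c hc, h4.2 c hc]
        simp only [hT, h5, e5, e4, if_false, Bool.false_eq_true, Bool.or_eq_true]
        by_cases h4 : (error_codes.map PySem.Str.lower).any pvP4 <;>
          by_cases hI : (error_codes.map PySem.Str.lower).any pvPI <;>
          by_cases hM : (error_codes.map PySem.Str.lower).any pvPM <;>
          simp [h4, hI, hM]
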